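-- pv_equiv track=rewrite | github.com/errogtr/advent-of-code | src/aoc/2016/day15/solution.py | min_alignment_time
-- ===== SOURCE A (Python) =====
-- from itertools import count
--
-- def min_alignment_time(discs):
--     first_disc, *other_discs = discs
--     first_disc_period, first_disc_start = first_disc
--     for k in count(1):
--         t = first_disc_period * k - first_disc_start
--
--         exit_conditions = [
--             (t + delta_t + start) % period == 0
--             for delta_t, (period, start) in enumerate(other_discs, 1)
--         ]
--
--         if all(exit_conditions):
--             return t - 1
-- ===== SOURCE B (Python) =====
-- def _egcd(a, b):
--     old_r, r = a, b
--     old_s, s = 1, 0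
--     old_t, t = 0, 1
--     while r != 0:
--         q = old_r // r
--         old_r, r = r, old_r - q * r
--         old_s, s = s, old_s - q * s
--         old_t, t = t, old_t - q * t
--     return old_r, old_s, old_t
--
--
-- def min_alignment_time(discs):
--     (p1, s1), *others = discs
--     # The k-th alignment of the first disc is at t = p1*k - s1, and the capsule then
--     # passes disc number i iff (t + i + start) % period == 0, i.e.
--     # p1*k == s1 - i - start (mod period).  Solve each congruence for k with the
--     # extended gcd and merge them; the answer comes from the first solution k >= 1.
--     M, K = 1, 0  # merged constraint: k == K (mod M)
--     for i, (p, s) in enumerate(others, 1):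
--         p = abs(p)  # a disc of period p repeats every |p| steps
--         g, x, _ = _egcd(p1 * M % p, p)
--         c = (s1 - i - s - p1 * K) % p
--         K += M * (c // g * x % (p // g))
--         M *= p // g
--     k = (K - 1) % M + 1
--     return p1 * k - s1 - 1
-- ===== Notes on version B (the rewrite author's own statement) =====
-- stated objective: alternative
-- what changed: A scans the first disc's alignment times t = p1*k - s1 for k = 1,2,... testing every other disc at each step; B solves each disc's congruence for the alignment index k with the extended gcd, merges the congruences Chinese-remainder style, and reads the first solution k >= 1 off the merged class (intended as asymptotically cheaper, but a timing run could not confirm a ratio because A already times out on small inputs). …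
import Mathlib
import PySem

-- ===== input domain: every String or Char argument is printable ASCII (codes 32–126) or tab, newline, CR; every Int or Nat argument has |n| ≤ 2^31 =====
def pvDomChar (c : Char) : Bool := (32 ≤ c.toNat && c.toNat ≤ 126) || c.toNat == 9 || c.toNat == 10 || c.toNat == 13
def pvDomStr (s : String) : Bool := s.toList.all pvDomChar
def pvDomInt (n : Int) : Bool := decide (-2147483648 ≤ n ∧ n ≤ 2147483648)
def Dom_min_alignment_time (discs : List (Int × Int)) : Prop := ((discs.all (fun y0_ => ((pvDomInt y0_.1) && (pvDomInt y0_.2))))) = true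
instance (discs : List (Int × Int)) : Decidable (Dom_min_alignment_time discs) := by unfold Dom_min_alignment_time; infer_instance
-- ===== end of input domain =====

-- B replaces A's linear scan of the first disc's alignment index k by an extended-gcd
-- Chinese-remainder merge of the per-disc congruences on k (a different algorithm; return
-- value proved equal on Pre_).

-- ===== PORT A =====
-- A's inner check: all((t + delta_t + start) % period == 0 for delta_t,(period,start) in enumerate(other_discs, 1))
def pvAllOk (others : List (Int × Int)) (t : Int) : Bool :=
  (((PySem.List.enumerate others 1).map
      (fun ds => PySem.Int.mod (t + ds.1 + ds.2.2) ds.2.1 == 0)).all id)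

-- A's 'for k in count(1)' loop; the fuel argument only makes the unbounded Python loop total,
-- the search itself is A's, step for step (the proof shows the hit lies inside the fuel).
def pvLoopA (p1 s1 : Int) (others : List (Int × Int)) : Nat → Nat → Int
  | _, 0 => 0
  | k, fuel+1 =>
    let t := p1 * (k : Int) - s1
    if pvAllOk others t then t - 1 else pvLoopA p1 s1 others (k+1) fuel

def min_alignment_time (discs : List (Int × Int)) : Int :=
  match discs with
  | [] => 0    -- Python: 'first_disc, *other_discs = discs' raises ValueError; excluded by Pre_
  | (p1, s1) :: others =>
      pvLoopA p1 s1 others 1 ((((p1, s1) :: others).map (fun d => d.1.natAbs)).prod + 1)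

-- ===== PORT B =====
def pvAbs (a : Int) : Int := if a < 0 then -a else a    -- Python abs()

-- termination fact for the hand-written Euclid loop (Python floor % shrinks |r|)
theorem pvModAbs_lt (a b : Int) (hb : ¬ b = 0) :
    (a - PySem.Int.floordiv a b * b).natAbs < b.natAbs := by
  have h := PySem.Int.floordiv_mul_add_mod a b
  rcases lt_trichotomy b 0 with hlt | hz | hgt
  · have := PySem.Int.mod_neg_bounds a hlt
    omega
  · exact absurd hz hb
  · have h1 := PySem.Int.mod_nonneg a hgt
    have h2 := PySem.Int.mod_lt a hgt
    omega

-- B's _egcd while-loop, step for step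
def pvEgcdLoop (oldr r olds s oldt t : Int) : Int × Int × Int :=
  if h : r = 0 then (oldr, olds, oldt)
  else
    let q := PySem.Int.floordiv oldr r
    pvEgcdLoop r (oldr - q * r) s (olds - q * s) t (oldt - q * t)
termination_by r.natAbs
decreasing_by exact pvModAbs_lt oldr r h

def pvEgcd (a b : Int) : Int × Int × Int := pvEgcdLoop a b 1 0 0 1

-- body of B's for-loop over enumerate(others, 1); state is (M, K): k ≡ K (mod M)
def pvStepB (p1 s1 : Int) (st : Int × Int) (ds : Int × (Int × Int)) : Int × Int :=
  let M := st.1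
  let K := st.2
  let p := pvAbs ds.2.1
  let e := pvEgcd (PySem.Int.mod (p1 * M) p) p
  let g := e.1
  let x := e.2.1
  let c := PySem.Int.mod (s1 - ds.1 - ds.2.2 - p1 * K) p
  (M * PySem.Int.floordiv p g,
   K + M * PySem.Int.mod (PySem.Int.floordiv c g * x) (PySem.Int.floordiv p g))

def min_alignment_time_alt (discs : List (Int × Int)) : Int :=
  match discs with
  | [] => 0    -- Python: the unpacking raises ValueError; excluded by Pre_
  | (p1, s1) :: others =>
    let mk := (PySem.List.enumerate others 1).foldl (pvStepB p1 s1) (1, 0)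
    let k := PySem.Int.mod (mk.2 - 1) mk.1 + 1
    p1 * k - s1 - 1

-- ===== PRECONDITION & SPEC =====
-- Pre_ excludes exactly the inputs on which A does not return: the empty list (ValueError),
-- a zero period among the later discs (ZeroDivisionError), and incompatible congruence
-- systems, on which A's scan loops forever.
def Pre_min_alignment_time (discs : List (Int × Int)) : Prop :=
  discs ≠ [] ∧ (∀ d ∈ discs.tail, d.1 ≠ 0) ∧
  ∀ i, i < discs.length → ∀ j, j < discs.length → i < j →
    ((Int.gcd (discs.getD i (0,0)).1 (discs.getD j (0,0)).1 : Int)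
      ∣ (((i : Int) + (discs.getD i (0,0)).2) - ((j : Int) + (discs.getD j (0,0)).2)))
instance (discs : List (Int × Int)) : Decidable (Pre_min_alignment_time discs) := by
  unfold Pre_min_alignment_time; infer_instance

def pvWitness_min_alignment_time : (List (Int × Int)) := [(5, 4), (2, 1)]

def Spec_min_alignment_time (discs : List (Int × Int)) (out : Int) : Prop := out = min_alignment_time_alt discs
instance (discs : List (Int × Int)) (out : Int) : Decidable (Spec_min_alignment_time discs out) := by unfold Spec_min_alignment_time; infer_instance

-- ===== CLAIM (what is proved, stated in full; the proofs are below) =====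
def Claim_equal_min_alignment_time : Prop := ∀ (discs : List (Int × Int)), Dom_min_alignment_time discs → Pre_min_alignment_time discs → Spec_min_alignment_time discs (min_alignment_time discs)

-- ===== LEMMAS AND PROOFS =====

theorem pvAbs_eq (a : Int) : pvAbs a = |a| := by
  unfold pvAbs
  rcases lt_trichotomy a 0 with h | h | h <;>
    simp [abs_of_neg, abs_of_nonneg, le_of_lt, h]

theorem pvEgcdLoop_inv (a b : Int) : ∀ (oldr r olds s oldt t : Int),
    oldr = a * olds + b * oldt → r = a * s + b * t → 0 ≤ oldr → 0 ≤ r →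
    Int.gcd oldr r = Int.gcd a b →
    ((pvEgcdLoop oldr r olds s oldt t).1 = (Int.gcd a b : Int) ∧
     a * (pvEgcdLoop oldr r olds s oldt t).2.1 + b * (pvEgcdLoop oldr r olds s oldt t).2.2
       = (pvEgcdLoop oldr r olds s oldt t).1) := by
  intro oldr r olds s oldt t
  induction oldr, r, olds, s, oldt, t using pvEgcdLoop.induct with
  | case1 oldr olds s oldt t =>
    intro h1 h2 h3 h4 h5
    rw [pvEgcdLoop]
    simp only [dif_pos trivial]
    refine ⟨?_, h1.symm⟩
    simp only [Int.gcd, Int.natAbs_zero, Nat.gcd_zero_right] at h5 ⊢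
    omega
  | case2 oldr r olds s oldt t hzero q ih =>
    intro h1 h2 h3 h4 h5
    have hrpos : 0 < r := lt_of_le_of_ne h4 (Ne.symm hzero)
    have hmod : oldr - q * r = PySem.Int.mod oldr r := by
      have := PySem.Int.floordiv_mul_add_mod oldr r
      simp only [q]
      omega
    have hmn : 0 ≤ oldr - q * r := by
      rw [hmod]; exact PySem.Int.mod_nonneg oldr hrpos
    have hgcd : Int.gcd r (oldr - q * r) = Int.gcd a b := by
      conv_rhs => rw [← h5]
      have he : oldr - q * r = oldr + (-q) * r := by ring
      rw [he, Int.gcd_add_mul_right_right r oldr (-q)]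
      exact Int.gcd_comm r oldr
    have := ih h2 (by rw [h1, h2]; ring) hrpos.le hmn hgcd
    rw [pvEgcdLoop, dif_neg hzero]
    exact this

theorem pvEgcd_spec (a b : Int) (ha : 0 ≤ a) (hb : 0 < b) :
    (pvEgcd a b).1 = (Int.gcd a b : Int) ∧
    a * (pvEgcd a b).2.1 + b * (pvEgcd a b).2.2 = (pvEgcd a b).1 :=
  pvEgcdLoop_inv a b a b 1 0 0 1 (by ring) (by ring) ha (le_of_lt hb) rfl

-- the gcd–lcm distributivity inequality, by prime factorisations
theorem pvNatDistrib (a b c : Nat) (ha : a ≠ 0) (hb : b ≠ 0) (hc : c ≠ 0) :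
    Nat.gcd (Nat.lcm a b) c ∣ Nat.lcm (Nat.gcd a c) (Nat.gcd b c) := by
  have hab : Nat.lcm a b ≠ 0 := Nat.lcm_ne_zero ha hb
  have hac : Nat.gcd a c ≠ 0 := fun h => ha (Nat.eq_zero_of_gcd_eq_zero_left h)
  have hbc : Nat.gcd b c ≠ 0 := fun h => hb (Nat.eq_zero_of_gcd_eq_zero_left h)
  rw [← Nat.factorization_le_iff_dvd (by positivity) (Nat.lcm_ne_zero hac hbc)]
  rw [Nat.factorization_gcd hab hc, Nat.factorization_lcm ha hb,
    Nat.factorization_lcm hac hbc, Nat.factorization_gcd ha hc, Nat.factorization_gcd hb hc]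
  intro p
  simp only [Finsupp.inf_apply, Finsupp.sup_apply]
  omega

def pvLcmL (l : List Nat) : Nat := l.foldr Nat.lcm 1

theorem pvLcmL_ne_zero (l : List Nat) (h : ∀ a ∈ l, a ≠ 0) : pvLcmL l ≠ 0 := by
  induction l with
  | nil => simp [pvLcmL]
  | cons a l ih =>
    simp only [pvLcmL, List.foldr_cons]
    exact Nat.lcm_ne_zero (h a (by simp)) (ih (fun x hx => h x (by simp [hx])))

theorem pvGcdLcmL_dvd (c : Nat) (hc : c ≠ 0) (D : Int) :
    ∀ (l : List Nat), (∀ a ∈ l, a ≠ 0) → (∀ a ∈ l, (Nat.gcd a c : Int) ∣ D) →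
      ((Nat.gcd (pvLcmL l) c : Int) ∣ D) := by
  intro l
  induction l with
  | nil =>
    intro _ _
    simp [pvLcmL]
  | cons a l ih =>
    intro hnz hdvd
    have hl : pvLcmL l ≠ 0 := pvLcmL_ne_zero l (fun x hx => hnz x (by simp [hx]))
    have h1 : Nat.gcd (Nat.lcm a (pvLcmL l)) c ∣ Nat.lcm (Nat.gcd a c) (Nat.gcd (pvLcmL l) c) :=
      pvNatDistrib a _ c (hnz a (by simp)) hl hc
    have h2 : (↑(Nat.lcm (Nat.gcd a c) (Nat.gcd (pvLcmL l) c)) : Int) ∣ D := by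
      have d1 : (↑(Nat.gcd a c) : Int) ∣ D := hdvd a (by simp)
      have d2 : (↑(Nat.gcd (pvLcmL l) c) : Int) ∣ D :=
        ih (fun x hx => hnz x (by simp [hx])) (fun x hx => hdvd x (by simp [hx]))
      rw [Int.natCast_dvd] at d1 d2 ⊢
      exact Nat.lcm_dvd d1 d2
    exact dvd_trans (Int.natCast_dvd_natCast.mpr h1) h2

theorem pvLcmL_append (l : List Nat) (a : Nat) :
    pvLcmL (l ++ [a]) = Nat.lcm (pvLcmL l) a := by
  induction l with
  | nil => simp [pvLcmL, Nat.lcm_comm]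
  | cons b l ih =>
    simp only [pvLcmL, List.cons_append, List.foldr_cons] at *
    rw [ih, ← Nat.lcm_assoc]

-- the CRT merge step: its output describes exactly the common solutions of the two congruences
theorem pvMergeGen (m p r r2 g x y : Int) (hm : 0 < m) (hp : 0 < p)
    (hr0 : 0 ≤ r) (hrm : r < m)
    (hg : g = (Int.gcd m p : Int)) (hbez : m * x + p * y = g)
    (hcompat : (Int.gcd m p : Int) ∣ (r2 - r)) :
    ((Int.gcd m p : Int) * (PySem.Int.floordiv m g * p) = m * p) ∧
    (0 ≤ r + m * PySem.Int.mod (PySem.Int.floordiv (r2 - r) g * x) (PySem.Int.floordiv p g)) ∧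
    (r + m * PySem.Int.mod (PySem.Int.floordiv (r2 - r) g * x) (PySem.Int.floordiv p g)
       < PySem.Int.floordiv m g * p) ∧
    (∀ t : Int, (PySem.Int.floordiv m g * p) ∣
        (t - (r + m * PySem.Int.mod (PySem.Int.floordiv (r2 - r) g * x) (PySem.Int.floordiv p g)))
      ↔ (m ∣ (t - r) ∧ p ∣ (t - r2))) := by
  have hgpos : (0 : Int) < g := by
    rw [hg]
    exact_mod_cast Int.gcd_pos_iff.mpr (Or.inl hm.ne')
  have hgm : g ∣ m := hg ▸ Int.gcd_dvd_left m p
  have hgp : g ∣ p := hg ▸ Int.gcd_dvd_right m p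
  have hgd : g ∣ (r2 - r) := hg ▸ hcompat
  obtain ⟨m', hm'⟩ := hgm
  obtain ⟨p', hp'⟩ := hgp
  obtain ⟨d, hd⟩ := hgd
  have hgne : g ≠ 0 := ne_of_gt hgpos
  have fdm : PySem.Int.floordiv m g = m' := by
    rw [PySem.Int.floordiv_eq_ediv_of_pos hgpos, hm', Int.mul_ediv_cancel_left _ hgne]
  have fdp : PySem.Int.floordiv p g = p' := by
    rw [PySem.Int.floordiv_eq_ediv_of_pos hgpos, hp', Int.mul_ediv_cancel_left _ hgne]
  have fdd : PySem.Int.floordiv (r2 - r) g = d := by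
    rw [PySem.Int.floordiv_eq_ediv_of_pos hgpos, hd, Int.mul_ediv_cancel_left _ hgne]
  have hm'pos : 0 < m' := by nlinarith [hm' ▸ hm]
  have hp'pos : 0 < p' := by nlinarith [hp' ▸ hp]
  have hbez' : m' * x + p' * y = 1 := by
    have h1 : g * (m' * x + p' * y) = g * 1 := by
      rw [mul_one, mul_add, ← mul_assoc, ← mul_assoc, ← hm', ← hp']
      exact hbez
    exact mul_left_cancel₀ hgne h1
  rw [fdm, fdp, fdd]
  set q := PySem.Int.mod (d * x) p' with hqdef
  have hq0 : 0 ≤ q := PySem.Int.mod_nonneg _ hp'pos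
  have hqp : q < p' := PySem.Int.mod_lt _ hp'pos
  obtain ⟨j, hj⟩ : ∃ j, d * x - q = p' * j := by
    have h := PySem.Int.floordiv_mul_add_mod (d * x) p'
    exact ⟨PySem.Int.floordiv (d * x) p', by linear_combination -h⟩
  have hMmul : m' * p = m * p' := by rw [hm', hp']; ring
  have key : p ∣ (m * q - (r2 - r)) := by
    refine ⟨-(d * y) - m' * j, ?_⟩
    have hq : q = d * x - p' * j := by omega
    rw [hq, hd, hm', hp']
    linear_combination (g * d) * hbez'
  have hmM : m ∣ m' * p := ⟨p', by rw [hMmul]⟩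
  have hpM : p ∣ m' * p := ⟨m', by ring⟩
  refine ⟨by rw [← hg, hm']; ring, by positivity, by nlinarith, ?_⟩
  intro t
  constructor
  · intro h
    constructor
    · have h1 : m ∣ (t - (r + m * q)) := dvd_trans hmM h
      have he : t - r = (t - (r + m * q)) + m * q := by ring
      rw [he]
      exact dvd_add h1 ⟨q, rfl⟩
    · have h1 : p ∣ (t - (r + m * q)) := dvd_trans hpM h
      have he : t - r2 = (t - (r + m * q)) + (m * q - (r2 - r)) := by ring
      rw [he]
      exact dvd_add h1 key
  · rintro ⟨h1, h2⟩
    obtain ⟨A, hA⟩ : m ∣ (t - (r + m * q)) := by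
      have he : t - (r + m * q) = (t - r) - m * q := by ring
      rw [he]
      exact dvd_sub h1 ⟨q, rfl⟩
    obtain ⟨B, hB⟩ : p ∣ (t - (r + m * q)) := by
      have he : t - (r + m * q) = (t - r2) - (m * q - (r2 - r)) := by ring
      rw [he]
      exact dvd_sub h2 key
    refine ⟨B * x + A * y, ?_⟩
    have hzg : (t - (r + m * q)) * g = (m' * p) * (B * x + A * y) * g := by
      calc (t - (r + m * q)) * g
          = (t - (r + m * q)) * (m * x) + (t - (r + m * q)) * (p * y) := by rw [← hbez]; ring
        _ = (p * B) * (m * x) + (m * A) * (p * y) := by rw [← hA, ← hB]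
        _ = (m' * p) * (B * x + A * y) * g := by rw [hm']; ring
    have := mul_right_cancel₀ hgne hzg
    linarith [this]

-- ---- generic CRT existence (used only for the solvable-system hypothesis of the k-fold) ----

-- the common-solution description of the first j congruences t ≡ aᵢ (mod mᵢ)
def pvTInv (l : List (Int × Int)) (j : Nat) (m r : Int) : Prop :=
  m = (pvLcmL ((l.take j).map (fun x => x.1.natAbs)) : Int) ∧ 0 ≤ r ∧ r < m ∧
  (∀ t : Int, m ∣ (t - r) ↔ ∀ i, i < j → (l.getD i (0,0)).1 ∣ (t - (l.getD i (0,0)).2))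

theorem pvCRTStep (l : List (Int × Int)) (j : Nat) (m r : Int)
    (hpos : ∀ x ∈ l, 0 < x.1)
    (hpair : ∀ i, i < l.length → ∀ j', j' < l.length → i < j' →
      ((Int.gcd (l.getD i (0,0)).1 (l.getD j' (0,0)).1 : Int)
        ∣ ((l.getD i (0,0)).2 - (l.getD j' (0,0)).2)))
    (hjn : j < l.length)
    (hinv : pvTInv l j m r) : ∃ m' r', pvTInv l (j+1) m' r' := by
  obtain ⟨hmL, hr0, hrm, hch⟩ := hinv
  have hdj : l.getD j (0,0) = l[j]'hjn := List.getD_eq_getElem _ _ hjn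
  set dj := l.getD j (0,0) with hdjdef
  have hmem : dj ∈ l := by rw [hdj]; exact List.getElem_mem hjn
  have hPj : (0:Int) < dj.1 := hpos dj hmem
  have hLLnz : pvLcmL ((l.take j).map (fun x => x.1.natAbs)) ≠ 0 := by
    apply pvLcmL_ne_zero
    intro a ha
    simp only [List.mem_map] at ha
    obtain ⟨d', hd', rfl⟩ := ha
    exact Int.natAbs_ne_zero.mpr (ne_of_gt (hpos d' (List.mem_of_mem_take hd')))
  have hmpos : 0 < m := by
    rw [hmL]
    exact_mod_cast Nat.pos_of_ne_zero hLLnz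
  set p := dj.1 with hpdef
  set x := Int.gcdA m p with hxdef
  set y := Int.gcdB m p with hydef
  have hbez : m * x + p * y = (Int.gcd m p : Int) := (Int.gcd_eq_gcd_ab m p).symm
  have hIntgcd : Int.gcd m p = Nat.gcd (pvLcmL ((l.take j).map (fun x => x.1.natAbs))) dj.1.natAbs := by
    have h2 : m.natAbs = pvLcmL ((l.take j).map (fun x => x.1.natAbs)) := by rw [hmL]; simp
    show m.natAbs.gcd p.natAbs = _
    rw [h2]
  have hcompat : (Int.gcd m p : Int) ∣ (dj.2 - r) := by
    have hcondr : ∀ i, i < j → (l.getD i (0,0)).1 ∣ (r - (l.getD i (0,0)).2) :=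
      (hch r).mp (by simp)
    have base : ∀ a ∈ (l.take j).map (fun x => x.1.natAbs),
        (Nat.gcd a dj.1.natAbs : Int) ∣ (r - dj.2) := by
      intro a ha
      simp only [List.mem_map] at ha
      obtain ⟨d', hd', rfl⟩ := ha
      obtain ⟨i, hi, hEq⟩ := List.mem_iff_getElem.mp hd'
      have hij : i < j ∧ i < l.length := by
        simp only [List.length_take] at hi
        omega
      have hEq' : l[i]'hij.2 = d' := by
        rw [← hEq, List.getElem_take]
      have hgetDi : l.getD i (0,0) = d' := by
        rw [List.getD_eq_getElem _ _ hij.2, hEq']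
      have hGdef : (Nat.gcd d'.1.natAbs dj.1.natAbs : Int) = (Int.gcd d'.1 dj.1 : Int) := rfl
      rw [hGdef]
      have hdl : (Int.gcd d'.1 dj.1 : Int) ∣ d'.1 := Int.gcd_dvd_left d'.1 dj.1
      have hchi : d'.1 ∣ (r - d'.2) := by
        have := hcondr i hij.1
        rwa [hgetDi] at this
      have hpairi := hpair i hij.2 j hjn hij.1
      rw [hgetDi] at hpairi
      have := dvd_add (dvd_trans hdl hchi) hpairi
      have he : r - d'.2 + (d'.2 - dj.2) = r - dj.2 := by ring
      rwa [he] at this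
    have hnz' : ∀ a ∈ (l.take j).map (fun x => x.1.natAbs), a ≠ 0 := by
      intro a ha
      simp only [List.mem_map] at ha
      obtain ⟨d', hd', rfl⟩ := ha
      exact Int.natAbs_ne_zero.mpr (ne_of_gt (hpos d' (List.mem_of_mem_take hd')))
    have := pvGcdLcmL_dvd dj.1.natAbs (Int.natAbs_ne_zero.mpr (ne_of_gt hPj)) (r - dj.2) _ hnz' base
    rw [hIntgcd]
    have he : dj.2 - r = -(r - dj.2) := by ring
    rw [he]
    exact dvd_neg.mpr this
  obtain ⟨hMg, hM0, hMlt, hMch⟩ :=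
    pvMergeGen m p r dj.2 (Int.gcd m p : Int) x y hmpos hPj hr0 hrm rfl hbez hcompat
  have hgcdne : (Int.gcd m p : Int) ≠ 0 := by
    rw [hIntgcd]
    exact_mod_cast Nat.pos_of_ne_zero (Nat.gcd_ne_zero_left hLLnz) |>.ne'
  have hLLsucc : pvLcmL ((l.take (j+1)).map (fun x => x.1.natAbs))
      = Nat.lcm (pvLcmL ((l.take j).map (fun x => x.1.natAbs))) dj.1.natAbs := by
    rw [List.take_add_one, List.getElem?_eq_getElem hjn]
    simp only [Option.toList_some, List.map_append, List.map_cons, List.map_nil]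
    rw [pvLcmL_append]
    rw [hdj]
  have hMeq : PySem.Int.floordiv m (Int.gcd m p : Int) * p
      = (pvLcmL ((l.take (j+1)).map (fun x => x.1.natAbs)) : Int) := by
    apply mul_left_cancel₀ hgcdne
    rw [hMg, hLLsucc]
    have : ((Int.gcd m p : Int)) * ((Nat.lcm (pvLcmL ((l.take j).map (fun x => x.1.natAbs))) dj.1.natAbs : Nat) : Int)
        = ((Nat.gcd (pvLcmL ((l.take j).map (fun x => x.1.natAbs))) dj.1.natAbs
            * Nat.lcm (pvLcmL ((l.take j).map (fun x => x.1.natAbs))) dj.1.natAbs : Nat) : Int) := by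
      rw [hIntgcd]; push_cast; ring
    rw [this, Nat.gcd_mul_lcm, hmL]
    have hpc : p = (dj.1.natAbs : Int) := (Int.natAbs_of_nonneg hPj.le).symm
    rw [hpc]
    push_cast; ring
  refine ⟨_, _, hMeq, hM0, hMlt, ?_⟩
  intro t
  rw [hMch t, hch t]
  constructor
  · rintro ⟨h1, h2⟩ i hi
    rcases Nat.lt_succ_iff_lt_or_eq.mp hi with hlt | heq
    · exact h1 i hlt
    · subst heq
      rwa [← hdjdef]
  · intro h
    refine ⟨fun i hi => h i (by omega), ?_⟩
    have := h j (by omega)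
    rwa [← hdjdef] at this

theorem pvCRT_exists (l : List (Int × Int))
    (hpos : ∀ x ∈ l, 0 < x.1)
    (hpair : ∀ i, i < l.length → ∀ j', j' < l.length → i < j' →
      ((Int.gcd (l.getD i (0,0)).1 (l.getD j' (0,0)).1 : Int)
        ∣ ((l.getD i (0,0)).2 - (l.getD j' (0,0)).2))) :
    ∃ t : Int, ∀ i, i < l.length → (l.getD i (0,0)).1 ∣ (t - (l.getD i (0,0)).2) := by
  have h : ∀ j, j ≤ l.length → ∃ m r, pvTInv l j m r := by
    intro j
    induction j with
    | zero =>
      intro _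
      exact ⟨1, 0, by simp [pvLcmL], le_refl 0, one_pos, by intro t; simp⟩
    | succ j ih =>
      intro hj
      obtain ⟨m, r, hinv⟩ := ih (by omega)
      exact pvCRTStep l j m r hpos hpair (by omega) hinv
  obtain ⟨m, r, _, _, _, hch⟩ := h l.length (le_refl _)
  exact ⟨r, (hch r).mp (by simp)⟩

-- ---- the linear-congruence solve of B's loop body ----

theorem pvLinSolve (a p c x y : Int) (hp : 0 < p)
    (hbez : a * x + p * y = (Int.gcd a p : Int))
    (hgc : (Int.gcd a p : Int) ∣ c) :
    0 < PySem.Int.floordiv p (Int.gcd a p : Int) ∧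
    (∀ u : Int, p ∣ (a * u - c) ↔
      PySem.Int.floordiv p (Int.gcd a p : Int) ∣
        (u - PySem.Int.mod (PySem.Int.floordiv c (Int.gcd a p : Int) * x)
              (PySem.Int.floordiv p (Int.gcd a p : Int)))) := by
  set g : Int := (Int.gcd a p : Int) with hgdef
  have hgpos : (0:Int) < g := by
    rw [hgdef]
    exact_mod_cast Int.gcd_pos_iff.mpr (Or.inr hp.ne')
  have hgne : g ≠ 0 := ne_of_gt hgpos
  obtain ⟨a', ha'⟩ : g ∣ a := hgdef ▸ Int.gcd_dvd_left a p
  obtain ⟨p', hp'⟩ : g ∣ p := hgdef ▸ Int.gcd_dvd_right a p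
  obtain ⟨c', hc'⟩ : g ∣ c := hgc
  have fdp : PySem.Int.floordiv p g = p' := by
    rw [PySem.Int.floordiv_eq_ediv_of_pos hgpos, hp', Int.mul_ediv_cancel_left _ hgne]
  have fdc : PySem.Int.floordiv c g = c' := by
    rw [PySem.Int.floordiv_eq_ediv_of_pos hgpos, hc', Int.mul_ediv_cancel_left _ hgne]
  have hp'pos : 0 < p' := by nlinarith [hp' ▸ hp]
  have hbez' : a' * x + p' * y = 1 := by
    have h1 : g * (a' * x + p' * y) = g * 1 := by
      rw [mul_one, mul_add, ← mul_assoc, ← mul_assoc, ← ha', ← hp']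
      exact hbez
    exact mul_left_cancel₀ hgne h1
  rw [fdp, fdc]
  refine ⟨hp'pos, ?_⟩
  set j0 := PySem.Int.mod (c' * x) p' with hj0def
  obtain ⟨f, hf⟩ : ∃ f, c' * x - j0 = p' * f := by
    have h := PySem.Int.floordiv_mul_add_mod (c' * x) p'
    exact ⟨PySem.Int.floordiv (c' * x) p', by linear_combination -h⟩
  intro u
  have hred : p ∣ (a * u - c) ↔ p' ∣ (a' * u - c') := by
    rw [hp', ha', hc']
    constructor
    · rintro ⟨q, hq⟩
      refine ⟨q, ?_⟩
      have h1 : g * (a' * u - c') = g * (p' * q) := by linear_combination hq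
      exact mul_left_cancel₀ hgne h1
    · rintro ⟨q, hq⟩
      exact ⟨q, by linear_combination g * hq⟩
  rw [hred]
  constructor
  · rintro ⟨q, hq⟩
    refine ⟨x * q + y * u + f, ?_⟩
    linear_combination x * hq - u * hbez' + hf
  · rintro ⟨q, hq⟩
    refine ⟨a' * q - c' * y - a' * f, ?_⟩
    linear_combination a' * hq - a' * hf + c' * hbez'

-- ---- B's k-space fold ----

-- the congruence system of the first j other discs, on the alignment index k
def pvKCond (p1 s1 : Int) (others : List (Int × Int)) (j : Nat) (k : Int) : Prop :=
  ∀ i, i < j →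
    (others.getD i (0,0)).1 ∣ (p1 * k - s1 + ((i : Int) + 1) + (others.getD i (0,0)).2)

-- loop invariant of B's fold: the state (M, K) describes exactly the k solving the first j discs
def pvKInv (p1 s1 : Int) (others : List (Int × Int)) (j : Nat) (M K : Int) : Prop :=
  0 < M ∧ 0 ≤ K ∧ K < M ∧
  M ≤ ((((others.take j).map (fun d => d.1.natAbs)).prod : Nat) : Int) ∧
  (∀ k : Int, M ∣ (k - K) ↔ pvKCond p1 s1 others j k)

theorem pvKStep (p1 s1 : Int) (others : List (Int × Int)) (j : Nat) (M K : Int)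
    (hjn : j < others.length) (hPnz : (others.getD j (0,0)).1 ≠ 0)
    (hinv : pvKInv p1 s1 others j M K)
    (hsol : ∃ ks, pvKCond p1 s1 others (j+1) ks) :
    pvKInv p1 s1 others (j+1)
      (pvStepB p1 s1 (M, K) ((j : Int) + 1, others.getD j (0,0))).1
      (pvStepB p1 s1 (M, K) ((j : Int) + 1, others.getD j (0,0))).2 := by
  obtain ⟨hM0, hK0, hKM, hMle, hch⟩ := hinv
  set dj := others.getD j (0,0) with hdjdef
  set p := pvAbs dj.1 with hpdef
  have hppos : (0:Int) < p := by
    rw [hpdef, pvAbs_eq]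
    exact abs_pos.mpr hPnz
  have hPdvd : ∀ z : Int, dj.1 ∣ z ↔ p ∣ z := by
    intro z
    rw [hpdef, pvAbs_eq]
    exact (abs_dvd dj.1 z).symm
  set a := PySem.Int.mod (p1 * M) p with hadef
  have ha0 : 0 ≤ a := PySem.Int.mod_nonneg _ hppos
  have hpa : p ∣ (p1 * M - a) := by
    have h := PySem.Int.floordiv_mul_add_mod (p1 * M) p
    exact ⟨PySem.Int.floordiv (p1 * M) p, by linear_combination -h⟩
  set C := s1 - ((j : Int) + 1) - dj.2 - p1 * K with hCdef
  set c := PySem.Int.mod C p with hcdef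
  have hpC : p ∣ (C - c) := by
    have h := PySem.Int.floordiv_mul_add_mod C p
    exact ⟨PySem.Int.floordiv C p, by linear_combination -h⟩
  obtain ⟨hg, hbez⟩ := pvEgcd_spec a p ha0 hppos
  -- the key arithmetic fact: for k = K + M*u, A's check for this disc is the congruence on u
  have hkey : ∀ u : Int, dj.1 ∣ (p1 * (K + M * u) - s1 + ((j:Int) + 1) + dj.2) ↔ p ∣ (a * u - c) := by
    intro u
    rw [hPdvd]
    constructor
    · intro h
      have h1 : p ∣ (p1 * M * u - C) := by
        have he : p1 * M * u - C = p1 * (K + M * u) - s1 + ((j:Int) + 1) + dj.2 := by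
          rw [hCdef]; ring
        rwa [he]
      have h2 : p ∣ ((p1 * M - a) * u) := Dvd.dvd.mul_right hpa u
      have h3 : p ∣ (a * u - C) := by
        have he : a * u - C = (p1 * M * u - C) - (p1 * M - a) * u := by ring
        rw [he]
        exact dvd_sub h1 h2
      have he : a * u - c = (a * u - C) + (C - c) := by ring
      rw [he]
      exact dvd_add h3 hpC
    · intro h
      have h1 : p ∣ (a * u - C) := by
        have he : a * u - C = (a * u - c) - (C - c) + 0 := by ring
        rw [he, add_zero]
        exact dvd_sub h hpC
      have h2 : p ∣ (p1 * M * u - C) := by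
        have he : p1 * M * u - C = (a * u - C) + (p1 * M - a) * u := by ring
        rw [he]
        exact dvd_add h1 (Dvd.dvd.mul_right hpa u)
      have he : p1 * (K + M * u) - s1 + ((j:Int) + 1) + dj.2 = p1 * M * u - C := by
        rw [hCdef]; ring
      rwa [he]
  -- solvability of this step, from the solvable full prefix
  have hgc : (Int.gcd a p : Int) ∣ c := by
    obtain ⟨ks, hks⟩ := hsol
    have hksj : pvKCond p1 s1 others j ks := fun i hi => hks i (by omega)
    obtain ⟨u, hu⟩ : M ∣ (ks - K) := (hch ks).mpr hksj
    have hksdj : dj.1 ∣ (p1 * (K + M * u) - s1 + ((j:Int) + 1) + dj.2) := by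
      have := hks j (by omega)
      rw [← hdjdef] at this
      have he : K + M * u = ks := by omega
      rwa [he]
    have h := (hkey u).mp hksdj
    have hga : (Int.gcd a p : Int) ∣ a := Int.gcd_dvd_left a p
    have hgp : (Int.gcd a p : Int) ∣ p := Int.gcd_dvd_right a p
    have he : c = a * u - (a * u - c) := by ring
    rw [he]
    exact dvd_sub (Dvd.dvd.mul_right hga u) (dvd_trans hgp h)
  obtain ⟨hp'pos, hsolve⟩ :=
    pvLinSolve a p c (pvEgcd a p).2.1 (pvEgcd a p).2.2 hppos (by rw [← hg]; exact hbez) hgc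
  rw [← hg] at hp'pos hsolve
  set p' := PySem.Int.floordiv p (pvEgcd a p).1 with hp'def
  set j0 := PySem.Int.mod (PySem.Int.floordiv c (pvEgcd a p).1 * (pvEgcd a p).2.1) p' with hj0def
  have hj00 : 0 ≤ j0 := PySem.Int.mod_nonneg _ hp'pos
  have hj0p : j0 < p' := PySem.Int.mod_lt _ hp'pos
  have hstep1 : (pvStepB p1 s1 (M, K) ((j : Int) + 1, dj)).1 = M * p' := rfl
  have hstep2 : (pvStepB p1 s1 (M, K) ((j : Int) + 1, dj)).2 = K + M * j0 := rfl
  rw [hstep1, hstep2]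
  have hcondsplit : ∀ k : Int,
      pvKCond p1 s1 others (j+1) k ↔
        (pvKCond p1 s1 others j k ∧ dj.1 ∣ (p1 * k - s1 + ((j:Int) + 1) + dj.2)) := by
    intro k
    constructor
    · intro h
      refine ⟨fun i hi => h i (by omega), ?_⟩
      have := h j (by omega)
      rwa [← hdjdef] at this
    · rintro ⟨h1, h2⟩ i hi
      rcases Nat.lt_succ_iff_lt_or_eq.mp hi with hlt | heq
      · exact h1 i hlt
      · subst heq
        rwa [← hdjdef]
  refine ⟨by positivity, by positivity, by nlinarith, ?_, ?_⟩
  · -- M * p' ≤ ∏ of the first j+1 periods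
    have habs : p = ((dj.1.natAbs : Nat) : Int) := by
      rw [hpdef, pvAbs_eq]
      exact (Int.abs_eq_natAbs dj.1)
    have hp'lep : p' ≤ p := by
      have hgpos : (0:Int) < (pvEgcd a p).1 := by
        rw [hg]
        exact_mod_cast Int.gcd_pos_iff.mpr (Or.inr hppos.ne')
      rw [hp'def, PySem.Int.floordiv_eq_ediv_of_pos hgpos]
      exact Int.ediv_le_self _ hppos.le
    have hprodsucc : (others.take (j+1)).map (fun d => d.1.natAbs)
        = ((others.take j).map (fun d => d.1.natAbs)) ++ [dj.1.natAbs] := by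
      rw [List.take_add_one, List.getElem?_eq_getElem hjn]
      simp only [Option.toList_some, List.map_append, List.map_cons, List.map_nil]
      rw [hdjdef, List.getD_eq_getElem _ _ hjn]
    rw [hprodsucc, List.prod_append, List.prod_cons, List.prod_nil, Nat.mul_one, Nat.cast_mul,
      ← habs]
    have h1 : M * p' ≤ ((((others.take j).map (fun d => d.1.natAbs)).prod : Nat) : Int) * p' :=
      mul_le_mul_of_nonneg_right hMle (le_of_lt hp'pos)
    have h2 : ((((others.take j).map (fun d => d.1.natAbs)).prod : Nat) : Int) * p'
        ≤ ((((others.take j).map (fun d => d.1.natAbs)).prod : Nat) : Int) * p :=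
      mul_le_mul_of_nonneg_left hp'lep (by positivity)
    exact le_trans h1 h2
  · intro k
    rw [hcondsplit k]
    constructor
    · rintro ⟨v, hv⟩
      have hMk : M ∣ (k - K) := ⟨j0 + p' * v, by linear_combination hv⟩
      refine ⟨(hch k).mp hMk, ?_⟩
      have hk : k = K + M * (j0 + p' * v) := by linear_combination hv
      rw [hk]
      refine (hkey (j0 + p' * v)).mpr ?_
      refine (hsolve (j0 + p' * v)).mpr ⟨v, by ring⟩
    · rintro ⟨h1, h2⟩
      obtain ⟨u, hu⟩ : M ∣ (k - K) := (hch k).mpr h1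
      have hk : k = K + M * u := by omega
      rw [hk] at h2
      obtain ⟨v, hv⟩ := (hsolve u).mp ((hkey u).mp h2)
      exact ⟨v, by rw [hk]; linear_combination M * hv⟩

theorem pvKFold (p1 s1 : Int) (others : List (Int × Int))
    (hPnz : ∀ d ∈ others, d.1 ≠ 0)
    (hsol : ∃ ks, pvKCond p1 s1 others others.length ks) :
    ∀ (rest : List (Int × Int)) (j : Nat) (M K : Int),
      others.drop j = rest → j + rest.length = others.length →
      pvKInv p1 s1 others j M K →
      pvKInv p1 s1 others others.length
        ((PySem.List.enumerate rest ((j : Int) + 1)).foldl (pvStepB p1 s1) (M, K)).1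
        ((PySem.List.enumerate rest ((j : Int) + 1)).foldl (pvStepB p1 s1) (M, K)).2 := by
  intro rest
  induction rest with
  | nil =>
    intro j M K hdrop hlen hinv
    rw [PySem.List.enumerate_nil]
    simp only [List.foldl_nil]
    have hj : j = others.length := by simpa using hlen
    rw [← hj]
    exact hinv
  | cons d rest ih =>
    intro j M K hdrop hlen hinv
    have hjn : j < others.length := by simp at hlen; omega
    have hdj : others.getD j (0,0) = d := by
      have h0 : (List.drop j others)[0]? = others[j + 0]? := List.getElem?_drop
      rw [hdrop] at h0
      simp only [List.getElem?_cons_zero, Nat.add_zero] at h0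
      rw [List.getD_eq_getElem?_getD, ← h0]
      rfl
    rw [PySem.List.enumerate_cons, List.foldl_cons]
    have hPnzj : (others.getD j (0,0)).1 ≠ 0 := by
      rw [hdj]
      exact hPnz d (by rw [← hdj, List.getD_eq_getElem _ _ hjn]; exact List.getElem_mem hjn)
    have hsolj : ∃ ks, pvKCond p1 s1 others (j+1) ks := by
      obtain ⟨ks, hks⟩ := hsol
      exact ⟨ks, fun i hi => hks i (by omega)⟩
    have hstep := pvKStep p1 s1 others j M K hjn hPnzj hinv hsolj
    rw [hdj] at hstep
    have hdrop' : others.drop (j+1) = rest := by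
      have : others.drop (j+1) = (others.drop j).drop 1 := by
        rw [List.drop_drop]
      rw [this, hdrop]
      simp
    have hcast : ((j : Int) + 1 + 1) = (((j+1 : Nat)) : Int) + 1 := by push_cast; ring
    rw [hcast]
    exact ih (j+1) _ _ hdrop' (by simp at hlen ⊢; omega) hstep

-- ---- A's loop and check ----

theorem pvAllOk_gen (t : Int) : ∀ (others : List (Int × Int)) (s : Int),
    (((PySem.List.enumerate others s).map
        (fun ds => PySem.Int.mod (t + ds.1 + ds.2.2) ds.2.1 == 0)).all id) = true ↔
      ∀ j, j < others.length →
        (others.getD j (0,0)).1 ∣ (t + (s + (j : Int)) + (others.getD j (0,0)).2) := by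
  intro others
  induction others with
  | nil => intro s; simp [PySem.List.enumerate_nil]
  | cons d l ih =>
    intro s
    rw [PySem.List.enumerate_cons]
    simp only [List.map_cons, List.all_cons, Bool.and_eq_true, id_eq, beq_iff_eq,
      PySem.Int.mod_eq_zero_iff_dvd]
    rw [ih (s+1)]
    constructor
    · rintro ⟨hd, hrest⟩ j hj
      cases j with
      | zero => simpa using hd
      | succ j' =>
        have := hrest j' (by simpa using hj)
        simp only [List.getD_cons_succ]
        convert this using 3
        push_cast; ring
    · intro h
      refine ⟨by simpa using h 0 (by simp), ?_⟩
      intro j hj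
      have := h (j+1) (by simpa using hj)
      simp only [List.getD_cons_succ] at this
      convert this using 3
      push_cast; ring

theorem pvAllOk_kcond (p1 s1 : Int) (others : List (Int × Int)) (k : Int) :
    pvAllOk others (p1 * k - s1) = true ↔ pvKCond p1 s1 others others.length k := by
  rw [pvAllOk, pvAllOk_gen (p1 * k - s1) others 1]
  unfold pvKCond
  constructor
  · intro h i hi
    have := h i hi
    have he : p1 * k - s1 + (1 + (i:Int)) + (others.getD i (0,0)).2
        = p1 * k - s1 + ((i:Int) + 1) + (others.getD i (0,0)).2 := by ring
    rwa [he] at this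
  · intro h i hi
    have := h i hi
    have he : p1 * k - s1 + ((i:Int) + 1) + (others.getD i (0,0)).2
        = p1 * k - s1 + (1 + (i:Int)) + (others.getD i (0,0)).2 := by ring
    rwa [he] at this

theorem pvLoopA_eq (p1 s1 : Int) (others : List (Int × Int)) :
    ∀ (fuel k kstar : Nat), k ≤ kstar → kstar < k + fuel →
      pvAllOk others (p1 * (kstar : Int) - s1) = true →
      (∀ k', k ≤ k' → k' < kstar → pvAllOk others (p1 * (k' : Int) - s1) = false) →
      pvLoopA p1 s1 others k fuel = p1 * (kstar : Int) - s1 - 1 := by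
  intro fuel
  induction fuel with
  | zero => intro k kstar h1 h2; omega
  | succ fuel ih =>
    intro k kstar h1 h2 hok hmin
    rw [pvLoopA]
    by_cases hk : k = kstar
    · subst hk
      rw [if_pos hok]
    · have hlt : k < kstar := lt_of_le_of_ne h1 hk
      rw [if_neg ?_]
      · exact ih (k+1) kstar hlt (by omega) hok (fun k' a b => hmin k' (by omega) b)
      · have := hmin k (le_refl k) hlt
        simp [this]

-- ---- assembly ----

theorem pvMain (p1 s1 : Int) (others : List (Int × Int))
    (hPnz : ∀ d ∈ others, d.1 ≠ 0)
    (hpair : ∀ i, i < ((p1,s1) :: others).length → ∀ j', j' < ((p1,s1) :: others).length → i < j' →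
      ((Int.gcd (((p1,s1) :: others).getD i (0,0)).1 (((p1,s1) :: others).getD j' (0,0)).1 : Int)
        ∣ (((i : Int) + (((p1,s1) :: others).getD i (0,0)).2) - ((j' : Int) + (((p1,s1) :: others).getD j' (0,0)).2)))) :
    min_alignment_time ((p1,s1) :: others) = min_alignment_time_alt ((p1,s1) :: others) := by
  set full := (p1,s1) :: others with hfull
  set n := others.length with hn
  -- a solution k⋆ of the whole system exists
  have hsol : ∃ ks, pvKCond p1 s1 others n ks := by
    by_cases hp1z : p1 = 0
    · -- degenerate first disc: the pairwise conditions against it are the congruences themselves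
      refine ⟨0, fun i hi => ?_⟩
      have h := hpair 0 (by simp [hfull]) (i+1) (by simp [hfull]; omega) (by omega)
      simp only [hfull, List.getD_cons_zero, List.getD_cons_succ] at h
      rw [hp1z] at h ⊢
      have hgcd : (Int.gcd 0 (others.getD i (0,0)).1 : Int) = ((others.getD i (0,0)).1.natAbs : Int) := by
        simp [Int.gcd]
      rw [hgcd] at h
      have h' : (others.getD i (0,0)).1 ∣ ((0:Int) + s1 - (((i+1:Nat):Int) + (others.getD i (0,0)).2)) :=
        (Int.natAbs_dvd).mp h
      have he : 0 * 0 - s1 + ((i:Int) + 1) + (others.getD i (0,0)).2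
          = -((0:Int) + s1 - (((i+1:Nat):Int) + (others.getD i (0,0)).2)) := by push_cast; ring
      rw [he]
      exact dvd_neg.mpr h'
    · -- general case: Chinese remainder existence over all |periods|
      set l := (List.range full.length).map
        (fun i => (pvAbs (full.getD i (0,0)).1, -((i:Int) + (full.getD i (0,0)).2))) with hldef
      have hlen : l.length = full.length := by simp [hldef]
      have hgetl : ∀ i, i < full.length →
          l.getD i (0,0) = (pvAbs (full.getD i (0,0)).1, -((i:Int) + (full.getD i (0,0)).2)) := by
        intro i hi
        rw [hldef, List.getD_eq_getElem _ _ (by simpa using hi), List.getElem_map,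
          List.getElem_range]
      have hnzfull : ∀ i, i < full.length → (full.getD i (0,0)).1 ≠ 0 := by
        intro i hi
        match i with
        | 0 => simpa [hfull] using hp1z
        | i'+1 =>
          simp only [hfull, List.getD_cons_succ]
          have hi' : i' < others.length := by simp [hfull] at hi; omega
          exact hPnz _ (by rw [List.getD_eq_getElem _ _ hi']; exact List.getElem_mem hi')
      have hpos : ∀ x ∈ l, 0 < x.1 := by
        intro x hx
        rw [hldef] at hx
        simp only [List.mem_map, List.mem_range] at hx
        obtain ⟨i, hi, rfl⟩ := hx
        rw [pvAbs_eq]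
        exact abs_pos.mpr (hnzfull i hi)
      have hpairl : ∀ i, i < l.length → ∀ j', j' < l.length → i < j' →
          ((Int.gcd (l.getD i (0,0)).1 (l.getD j' (0,0)).1 : Int)
            ∣ ((l.getD i (0,0)).2 - (l.getD j' (0,0)).2)) := by
        intro i hi j' hj' hij
        rw [hlen] at hi hj'
        rw [hgetl i hi, hgetl j' hj']
        have hg : Int.gcd (pvAbs (full.getD i (0,0)).1) (pvAbs (full.getD j' (0,0)).1)
            = Int.gcd (full.getD i (0,0)).1 (full.getD j' (0,0)).1 := by
          simp only [Int.gcd, pvAbs_eq, Int.natAbs_abs]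
        rw [hg]
        have h := hpair i hi j' hj' hij
        have he : -((i:Int) + (full.getD i (0,0)).2) - -((j':Int) + (full.getD j' (0,0)).2)
            = -(((i:Int) + (full.getD i (0,0)).2) - ((j':Int) + (full.getD j' (0,0)).2)) := by ring
        rw [he]
        exact dvd_neg.mpr h
      obtain ⟨t, ht⟩ := pvCRT_exists l hpos hpairl
      have htfull : ∀ i, i < full.length → (full.getD i (0,0)).1 ∣ (t + (i:Int) + (full.getD i (0,0)).2) := by
        intro i hi
        have := ht i (by omega)
        rw [hgetl i hi] at this
        simp only at this
        have h1 : pvAbs (full.getD i (0,0)).1 ∣ (t + (i:Int) + (full.getD i (0,0)).2) := by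
          have he : t - -((i:Int) + (full.getD i (0,0)).2) = t + (i:Int) + (full.getD i (0,0)).2 := by ring
          rwa [he] at this
        rw [pvAbs_eq] at h1
        exact (abs_dvd _ _).mp h1
      have h0 := htfull 0 (by simp [hfull])
      simp only [hfull, List.getD_cons_zero, Nat.cast_zero, add_zero] at h0
      obtain ⟨u, hu⟩ := h0
      refine ⟨u, fun i hi => ?_⟩
      have := htfull (i+1) (by simp [hfull]; omega)
      simp only [hfull, List.getD_cons_succ] at this
      have he : t + ((i+1:Nat):Int) + (others.getD i (0,0)).2
          = p1 * u - s1 + ((i:Int) + 1) + (others.getD i (0,0)).2 := by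
        push_cast
        linarith [hu]
      rwa [he] at this
  -- run B's fold
  have hInv0 : pvKInv p1 s1 others 0 1 0 := by
    refine ⟨one_pos, le_refl 0, one_pos, by simp, ?_⟩
    intro k
    constructor
    · intro _ i hi
      omega
    · intro _
      simp
  have hfold := pvKFold p1 s1 others hPnz hsol others 0 1 0 (by simp) (by simp) hInv0
  simp only [Nat.cast_zero, zero_add] at hfold
  set mk := (PySem.List.enumerate others 1).foldl (pvStepB p1 s1) (1, 0) with hmkdef
  obtain ⟨hM0, hK0, hKM, hMle, hch⟩ := hfold
  set kmin := PySem.Int.mod (mk.2 - 1) mk.1 + 1 with hkmindef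
  have hkmin1 : 1 ≤ kmin := by
    have := PySem.Int.mod_nonneg (mk.2 - 1) hM0
    omega
  have hkminM : kmin ≤ mk.1 := by
    have := PySem.Int.mod_lt (mk.2 - 1) hM0
    omega
  have hkmincl : mk.1 ∣ (kmin - mk.2) := by
    have h := PySem.Int.floordiv_mul_add_mod (mk.2 - 1) mk.1
    exact ⟨-(PySem.Int.floordiv (mk.2 - 1) mk.1), by linear_combination h⟩
  have hkmincond : pvKCond p1 s1 others n kmin := (hch kmin).mp hkmincl
  -- the scan's fuel reaches kmin
  have hfuelInt : kmin ≤ (((full.map (fun d => d.1.natAbs)).prod : Nat) : Int) + 1 := by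
    have hprodfull : (full.map (fun d => d.1.natAbs)).prod
        = p1.natAbs * (others.map (fun d => d.1.natAbs)).prod := by
      simp [hfull]
    by_cases hp1z : p1 = 0
    · -- all k solve the system, so the merged modulus is 1 and kmin = 1
      have hallk : ∀ k : Int, pvKCond p1 s1 others n k := by
        intro k i hi
        have h := hkmincond i hi
        have he : p1 * k - s1 + ((i:Int) + 1) + (others.getD i (0,0)).2
            = p1 * kmin - s1 + ((i:Int) + 1) + (others.getD i (0,0)).2 := by
          rw [hp1z]; ring
        rwa [he]
      have hM1 : mk.1 ∣ ((mk.2 + 1) - mk.2) := (hch (mk.2 + 1)).mpr (hallk _)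
      have : mk.1 ≤ 1 := Int.le_of_dvd one_pos (by simpa using hM1)
      have h0 : (0:Int) ≤ (((full.map (fun d => d.1.natAbs)).prod : Nat) : Int) := by positivity
      omega
    · have htake : others.take n = others := by simp [hn]
      rw [htake] at hMle
      have hN : (others.map (fun d => d.1.natAbs)).prod
          ≤ p1.natAbs * (others.map (fun d => d.1.natAbs)).prod :=
        Nat.le_mul_of_pos_left _ (Nat.pos_of_ne_zero (Int.natAbs_ne_zero.mpr hp1z))
      have hle2 : (((others.map (fun d => d.1.natAbs)).prod : Nat) : Int)
          ≤ (((full.map (fun d => d.1.natAbs)).prod : Nat) : Int) := by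
        rw [hprodfull]
        exact_mod_cast hN
      omega
  set kN := kmin.toNat with hkNdef
  have hkNc : (kN : Int) = kmin := Int.toNat_of_nonneg (by omega)
  have hokB : pvAllOk others (p1 * (kN : Int) - s1) = true := by
    rw [hkNc]
    exact (pvAllOk_kcond p1 s1 others kmin).mpr hkmincond
  have hminB : ∀ k', 1 ≤ k' → k' < kN → pvAllOk others (p1 * (k' : Int) - s1) = false := by
    intro k' hk1 hk2
    by_contra hc
    rw [Bool.not_eq_false] at hc
    have hcond' := (pvAllOk_kcond p1 s1 others (k' : Int)).mp hc
    have hd1 : mk.1 ∣ ((k' : Int) - mk.2) := (hch _).mpr hcond'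
    have hdd : mk.1 ∣ (kmin - (k' : Int)) := by
      have he : kmin - (k' : Int) = (kmin - mk.2) - ((k' : Int) - mk.2) := by ring
      rw [he]
      exact dvd_sub hkmincl hd1
    have hlt : (k' : Int) < kmin := by omega
    have hpos' : 0 < kmin - (k' : Int) := by omega
    have hle : kmin - (k' : Int) ≤ mk.1 - 1 := by
      have : (1:Int) ≤ (k' : Int) := by exact_mod_cast hk1
      omega
    have := Int.le_of_dvd hpos' hdd
    omega
  have hfuel : kN < 1 + ((full.map (fun d => d.1.natAbs)).prod + 1) := by omega
  have hloop := pvLoopA_eq p1 s1 others ((full.map (fun d => d.1.natAbs)).prod + 1) 1 kN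
    (by omega) hfuel hokB hminB
  have hAeq : min_alignment_time full
      = pvLoopA p1 s1 others 1 ((full.map (fun d => d.1.natAbs)).prod + 1) := by
    rw [hfull]; rfl
  have hBeq : min_alignment_time_alt full = p1 * kmin - s1 - 1 := by
    rw [hfull]
    show p1 * (PySem.Int.mod (((PySem.List.enumerate others 1).foldl (pvStepB p1 s1) (1, 0)).2 - 1)
      ((PySem.List.enumerate others 1).foldl (pvStepB p1 s1) (1, 0)).1 + 1) - s1 - 1
      = p1 * kmin - s1 - 1
    rw [hkmindef, hmkdef]
  rw [hAeq, hBeq, hloop, hkNc]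

-- ===== VERDICT (by name: the statement is the Claim_ definition above) =====
theorem min_alignment_time_spec : Claim_equal_min_alignment_time := by
  intro discs _hdom hpre
  obtain ⟨hne, hnz, hpair⟩ := hpre
  unfold Spec_min_alignment_time
  match discs with
  | [] => exact absurd rfl hne
  | (p1, s1) :: others => exact pvMain p1 s1 others hnz hpair
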